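-- pv_equiv track=rewrite | github.com/anton-kabantsev/RDP_Log_off | rdp_random_log_off.py | spaces_deletion
-- ===== SOURCE A (Python) =====
-- def spaces_deletion(str):
--     string = ''
--     ind = 0
--     for i in str.split():
--         if ind > 0:
--             string = string +' '+i.strip()
--         else:
--             string = string + i.strip()
--         ind = ind +1
--     return string
-- ===== SOURCE B (Python) =====
-- def spaces_deletion(str):
--     # single character-level pass: collapse whitespace runs, drop leading/trailing
--     out = []
--     in_word = False
--     for c in str:
--         if c.isspace():
--             in_word = False
--         else:
--             if not in_word and out:
--                 out.append(' ')
--             out.append(c)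
--             in_word = True
--     return ''.join(out)
-- ===== Notes on version B (the rewrite author's own statement) =====
-- stated objective: alternative
-- what changed: replaces split()-then-concatenate-in-a-loop with a single explicit character-level scan that tracks an in-word flag and joins an output list once
import Mathlib
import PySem

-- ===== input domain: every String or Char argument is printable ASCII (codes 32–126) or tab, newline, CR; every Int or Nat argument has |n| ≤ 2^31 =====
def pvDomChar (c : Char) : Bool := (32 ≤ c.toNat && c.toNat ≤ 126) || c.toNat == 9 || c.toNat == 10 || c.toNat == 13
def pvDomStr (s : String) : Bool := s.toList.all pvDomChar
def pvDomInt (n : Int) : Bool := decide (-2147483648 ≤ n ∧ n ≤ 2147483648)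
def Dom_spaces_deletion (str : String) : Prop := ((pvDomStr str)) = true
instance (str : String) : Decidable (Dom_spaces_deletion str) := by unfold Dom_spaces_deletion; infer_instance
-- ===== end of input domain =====

-- B replaces A's split()-then-concatenate loop by a single character-level scan; return value proved equal on all inputs.

-- ===== PORT A =====
-- string concatenation is ported on List Char (String.append is opaque to the kernel); String.mk at the end
def spaces_deletion (str : String) : String :=
  String.ofList ((PySem.Str.split₀ str).foldl
    (fun (st : List Char × Int) i =>
      if st.2 > 0 then (st.1 ++ [' '] ++ (PySem.Str.strip i).toList, st.2 + 1)
      else (st.1 ++ (PySem.Str.strip i).toList, st.2 + 1)) ([], 0)).1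

-- ===== PORT B =====
def spaces_deletion_alt (str : String) : String :=
  String.ofList (str.toList.foldl
    (fun (st : List Char × Bool) c =>
      if PySem.Chars.isspace c then (st.1, false)
      else ((if !st.2 && !st.1.isEmpty then st.1 ++ [' '] else st.1) ++ [c], true))
    ([], false)).1

-- ===== PRECONDITION & SPEC =====
def Spec_spaces_deletion (str : String) (out : String) : Prop := out = spaces_deletion_alt str
instance (str : String) (out : String) : Decidable (Spec_spaces_deletion str out) := by unfold Spec_spaces_deletion; infer_instance

-- ===== CLAIM (what is proved, stated in full; the proofs are below) =====
def Claim_equal_spaces_deletion : Prop := ∀ (str : String), Dom_spaces_deletion str → Spec_spaces_deletion str (spaces_deletion str)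

-- ===== LEMMAS AND PROOFS =====

-- words of a string, mirroring PySem.Chars.split₀.go with its token accumulator removed
def pvWordsAux : List Char → List Char → List (List Char)
  | [], cur => if cur.isEmpty then [] else [cur.reverse]
  | c :: rest, cur =>
    if PySem.Chars.isspace c then
      if cur.isEmpty then pvWordsAux rest [] else cur.reverse :: pvWordsAux rest []
    else pvWordsAux rest (c :: cur)

-- each remaining word prefixed by one space
def pvEmitAll (ws : List (List Char)) : List Char := (ws.map (fun w => ' ' :: w)).flatten

-- first word bare, the rest space-prefixed
def pvJoinW : List (List Char) → List Char
  | [] => []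
  | w :: rest => w ++ pvEmitAll rest

theorem pvWordsAux_ne_nil (s cur : List Char) (h : cur ≠ []) : pvWordsAux s cur ≠ [] := by
  induction s generalizing cur with
  | nil => simp [pvWordsAux, h]
  | cons c rest ih =>
    simp only [pvWordsAux]
    split
    · simp [List.isEmpty_iff, h]
    · exact ih (c :: cur) (by simp)

theorem pv_go_eq (s cur : List Char) (accW : List (List Char)) :
    PySem.Chars.split₀.go s cur accW = accW.reverse ++ pvWordsAux s cur := by
  induction s generalizing cur accW with
  | nil =>
    simp only [PySem.Chars.split₀.go, pvWordsAux]
    split <;> simp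
  | cons c rest ih =>
    simp only [PySem.Chars.split₀.go, pvWordsAux]
    split
    · split
      · simp [ih]
      · simp [ih]
    · simp [ih]

theorem pv_split₀_eq (cs : List Char) : PySem.Chars.split₀ cs = pvWordsAux cs [] := by
  simpa using pv_go_eq cs [] []

theorem pvWordsAux_no_space (s cur : List Char) (hc : ∀ c ∈ cur, PySem.Chars.isspace c = false) :
    ∀ w ∈ pvWordsAux s cur, ∀ c ∈ w, PySem.Chars.isspace c = false := by
  induction s generalizing cur with
  | nil =>
    intro w hw d hdw
    by_cases h0 : cur.isEmpty
    · simp [pvWordsAux, h0] at hw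
    · simp only [pvWordsAux, if_neg h0] at hw
      simp only [List.mem_singleton] at hw
      subst hw; exact hc d (by simpa using hdw)
  | cons a rest ih =>
    intro w hw d hdw
    by_cases hsp : PySem.Chars.isspace a = true
    · by_cases h0 : cur.isEmpty
      · simp only [pvWordsAux, if_pos hsp, if_pos h0] at hw
        exact ih [] (by simp) w hw d hdw
      · simp only [pvWordsAux, if_pos hsp, if_neg h0, List.mem_cons] at hw
        rcases hw with hw | hw
        · subst hw; exact hc d (by simpa using hdw)
        · exact ih [] (by simp) w hw d hdw
    · simp only [pvWordsAux, if_neg hsp] at hw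
      refine ih (a :: cur) ?_ w hw d hdw
      intro x hx
      rcases List.mem_cons.mp hx with hx | hx
      · subst hx; exact Bool.eq_false_iff.mpr hsp
      · exact hc x hx

theorem pv_strip_no_space (w : List Char) (h : ∀ c ∈ w, PySem.Chars.isspace c = false) :
    PySem.Chars.strip w = w := by
  have h1 : PySem.Chars.lstrip w = w := by
    simp only [PySem.Chars.lstrip]
    exact List.dropWhile_eq_self_iff.mpr (by cases w with
      | nil => simp
      | cons a t => simpa using h a (by simp))
  have h2 : PySem.Chars.rstrip w = w := by
    simp only [PySem.Chars.rstrip]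
    rw [List.dropWhile_eq_self_iff.mpr ?_]
    · simp
    · cases hw : w.reverse with
      | nil => simp
      | cons a t => simpa using h a (by
          have : a ∈ w.reverse := by simp [hw]
          simpa using this)
  simp [PySem.Chars.strip, h1, h2]

-- A's loop over the token list, from a state that has already emitted a word
theorem pvA_fold (ws : List (List Char)) (st : List Char) (n : Int) (hn : 1 ≤ n)
    (hw : ∀ w ∈ ws, PySem.Chars.strip w = w) :
    (ws.foldl (fun (st : List Char × Int) w =>
      if st.2 > 0 then (st.1 ++ [' '] ++ PySem.Chars.strip w, st.2 + 1)
      else (st.1 ++ PySem.Chars.strip w, st.2 + 1)) (st, n)).1 = st ++ pvEmitAll ws := by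
  induction ws generalizing st n with
  | nil => simp [pvEmitAll]
  | cons w rest ih =>
    simp only [List.foldl_cons]
    rw [if_pos (by omega)]
    rw [ih (st ++ [' '] ++ PySem.Chars.strip w) (n + 1) (by omega)
      (fun x hx => hw x (by simp [hx]))]
    simp [pvEmitAll, hw w (by simp)]

theorem pvA_result (ws : List (List Char)) (hw : ∀ w ∈ ws, PySem.Chars.strip w = w) :
    (ws.foldl (fun (st : List Char × Int) w =>
      if st.2 > 0 then (st.1 ++ [' '] ++ PySem.Chars.strip w, st.2 + 1)
      else (st.1 ++ PySem.Chars.strip w, st.2 + 1)) ([], 0)).1 = pvJoinW ws := by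
  cases ws with
  | nil => simp [pvJoinW]
  | cons w rest =>
    simp only [List.foldl_cons]
    rw [if_neg (by omega)]
    simp only [zero_add]
    rw [pvA_fold rest ([] ++ PySem.Chars.strip w) 1 (by omega)
      (fun x hx => hw x (by simp [hx]))]
    simp [pvJoinW, hw w (by simp)]

theorem pvEmitAll_eq_space_joinW (ws : List (List Char)) (h : ws ≠ []) :
    pvEmitAll ws = ' ' :: pvJoinW ws := by
  cases ws with
  | nil => exact absurd rfl h
  | cons w rest => simp [pvEmitAll, pvJoinW]

-- B's scan: the two-state invariant (in a word / between words), proved jointly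
theorem pvB_fold (s : List Char) :
    (∀ out : List Char,
      (s.foldl (fun (st : List Char × Bool) c =>
        if PySem.Chars.isspace c then (st.1, false)
        else ((if !st.2 && !st.1.isEmpty then st.1 ++ [' '] else st.1) ++ [c], true))
        (out, false)).1
      = out ++ (if out.isEmpty then pvJoinW (pvWordsAux s []) else pvEmitAll (pvWordsAux s []))) ∧
    (∀ (pre cur : List Char), cur ≠ [] →
      (s.foldl (fun (st : List Char × Bool) c =>
        if PySem.Chars.isspace c then (st.1, false)
        else ((if !st.2 && !st.1.isEmpty then st.1 ++ [' '] else st.1) ++ [c], true))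
        (pre ++ cur.reverse, true)).1
      = pre ++ pvJoinW (pvWordsAux s cur)) := by
  induction s with
  | nil =>
    constructor
    · intro out; simp [pvWordsAux, pvJoinW, pvEmitAll]
    · intro pre cur hcur; simp [pvWordsAux, hcur, pvJoinW, pvEmitAll]
  | cons c rest ih =>
    obtain ⟨ih0, ih1⟩ := ih
    constructor
    · intro out
      simp only [List.foldl_cons]
      by_cases hsp : PySem.Chars.isspace c
      · rw [if_pos hsp]
        rw [ih0 out]
        simp [pvWordsAux, hsp]
      · rw [if_neg hsp]
        simp only [Bool.not_false, Bool.true_and]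
        by_cases hout : out = []
        · subst hout
          rw [if_neg (by simp)]
          have h1 := ih1 [] [c] (by simp)
          simp only [List.reverse_singleton, List.nil_append] at h1 ⊢
          rw [h1]
          simp [pvWordsAux, hsp]
        · rw [if_pos (by simp [hout])]
          have h1 := ih1 (out ++ [' ']) [c] (by simp)
          simp only [List.reverse_singleton, List.append_assoc] at h1 ⊢
          rw [h1]
          rw [if_neg (by simp [List.isEmpty_iff, hout])]
          have hne : pvWordsAux rest [c] ≠ [] := pvWordsAux_ne_nil rest [c] (by simp)
          simp only [pvWordsAux, if_neg hsp]
          rw [pvEmitAll_eq_space_joinW _ hne]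
          simp
    · intro pre cur hcur
      simp only [List.foldl_cons]
      by_cases hsp : PySem.Chars.isspace c
      · rw [if_pos hsp]
        rw [ih0 (pre ++ cur.reverse)]
        have hE : (pre ++ cur.reverse).isEmpty = false := by
          simp [hcur]
        rw [hE]
        simp only [Bool.false_eq_true, if_false]
        simp only [pvWordsAux, hsp, List.isEmpty_iff, hcur]
        simp [pvJoinW]
      · rw [if_neg hsp]
        simp only [Bool.not_true, Bool.false_and, Bool.false_eq_true, if_false]
        have := ih1 pre (c :: cur) (by simp)
        simp only [List.reverse_cons, List.append_assoc] at this ⊢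
        rw [this]
        simp [pvWordsAux, hsp]

-- ===== VERDICT (by name: the statement is the Claim_ definition above) =====
theorem spaces_deletion_spec : Claim_equal_spaces_deletion := by
  intro str _
  show spaces_deletion str = spaces_deletion_alt str
  unfold spaces_deletion spaces_deletion_alt
  have hA : ((PySem.Str.split₀ str).foldl
      (fun (st : List Char × Int) i =>
        if st.2 > 0 then (st.1 ++ [' '] ++ (PySem.Str.strip i).toList, st.2 + 1)
        else (st.1 ++ (PySem.Str.strip i).toList, st.2 + 1)) ([], 0)).1
      = pvJoinW (pvWordsAux str.toList []) := by
    have hmap := PySem.Str.split₀_map_toList str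
    have hfold : ((PySem.Str.split₀ str).map String.toList).foldl
        (fun (st : List Char × Int) w =>
          if st.2 > 0 then (st.1 ++ [' '] ++ PySem.Chars.strip w, st.2 + 1)
          else (st.1 ++ PySem.Chars.strip w, st.2 + 1)) ([], 0)
        = (PySem.Str.split₀ str).foldl
        (fun (st : List Char × Int) i =>
          if st.2 > 0 then (st.1 ++ [' '] ++ (PySem.Str.strip i).toList, st.2 + 1)
          else (st.1 ++ (PySem.Str.strip i).toList, st.2 + 1)) ([], 0) := by
      rw [List.foldl_map]
      simp [PySem.Str.toList_strip]
    rw [← hfold, hmap, pv_split₀_eq]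
    exact pvA_result _ (fun w hw => pv_strip_no_space w
      (pvWordsAux_no_space str.toList [] (by simp) w hw))
  have hB := (pvB_fold str.toList).1 []
  simp only [List.isEmpty_nil, List.nil_append] at hB
  rw [hA, hB]
  simp
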